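-- pv_equiv track=rewrite | github.com/trailofbits/polytracker | polytracker/cfg.py | tainted_chunks
-- ===== SOURCE A (Python) =====
-- from typing import (
--     Any,
--     Callable,
--     Collection,
--     Dict,
--     FrozenSet,
--     Generic,
--     ItemsView,
--     Iterable,
--     Iterator,
--     KeysView,
--     List,
--     Optional,
--     Set,
--     Tuple,
--     TypeVar,
--     Union,
-- )
--
-- def tainted_chunks(byte_offsets: Iterable[int]) -> Iterator[Tuple[int, int]]:
--     start_offset: Optional[int] = None
--     last_offset: Optional[int] = None
--     for offset in sorted(byte_offsets):
--         if last_offset is None: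
--             start_offset = offset
--         elif offset != last_offset and offset != last_offset + 1:
--             yield start_offset, last_offset + 1  # type: ignore
--             start_offset = offset
--         last_offset = offset
--     if last_offset is not None:
--         yield start_offset, last_offset + 1  # type: ignore
-- ===== SOURCE B (Python) =====
-- from itertools import groupby
--
--
-- def tainted_chunks(byte_offsets):
--     vals = sorted(set(byte_offsets))
--     for _, grp in groupby(enumerate(vals), key=lambda p: p[1] - p[0]):
--         run = [v for _, v in grp]
--         yield run[0], run[-1] + 1
-- ===== Notes on version B (the rewrite author's own statement) =====
-- stated objective: idiomatic
-- what changed: B collapses duplicates up front with set(), then uses itertools.groupby keyed by value-minus-index to split the sorted distinct offsets into maximal consecutive runs, replacing A's hand-rolled start/last state machine.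
import Mathlib
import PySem

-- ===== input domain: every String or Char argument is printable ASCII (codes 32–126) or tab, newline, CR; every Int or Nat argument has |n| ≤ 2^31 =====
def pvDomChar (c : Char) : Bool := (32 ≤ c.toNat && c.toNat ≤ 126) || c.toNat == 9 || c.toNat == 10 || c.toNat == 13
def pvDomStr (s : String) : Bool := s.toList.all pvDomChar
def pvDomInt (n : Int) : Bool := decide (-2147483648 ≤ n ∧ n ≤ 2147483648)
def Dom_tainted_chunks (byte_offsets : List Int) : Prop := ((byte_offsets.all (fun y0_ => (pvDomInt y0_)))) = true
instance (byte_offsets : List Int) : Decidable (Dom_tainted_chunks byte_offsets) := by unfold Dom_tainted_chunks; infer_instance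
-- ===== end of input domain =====

-- B re-derives the same chunks idiomatically: set() + sorted + a groupby keyed by value-minus-index,
-- instead of A's start/last state machine over the sorted multiset.

-- ===== PORT A =====
-- A's loop body: state = (start_offset, last_offset, chunks yielded so far).
-- 'start_offset.getD 0' reads the Optional start; whenever it is read, last_offset is some,
-- and then start_offset is some too (the default is never used).
def pvStepA (st : Option Int × Option Int × List (Int × Int)) (offset : Int) :
    Option Int × Option Int × List (Int × Int) :=
  match st with
  | (start?, last?, acc) =>
    match last? with
    | none => (some offset, some offset, acc)
    | some l =>
      if offset ≠ l ∧ offset ≠ l + 1 then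
        (some offset, some offset, acc ++ [(start?.getD 0, l + 1)])
      else (start?, some offset, acc)

def tainted_chunks (byte_offsets : List Int) : List (Int × Int) :=
  match (PySem.List.sorted byte_offsets (fun x => x) false).foldl pvStepA (none, none, []) with
  | (start?, last?, acc) =>
    match last? with
    | none => acc
    | some l => acc ++ [(start?.getD 0, l + 1)]

-- ===== PORT B =====
-- itertools.groupby(key=k): take the leading run whose key equals the first element's key …
def pvTakeRun (k : Int) : List (Int × Int) → List (Int × Int) × List (Int × Int)
  | [] => ([], [])
  | p :: ps =>
    if p.2 - p.1 = k then
      let (r, rest) := pvTakeRun k ps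
      (p :: r, rest)
    else ([], p :: ps)

theorem pvTakeRun_rest_length (k : Int) : ∀ ps : List (Int × Int), (pvTakeRun k ps).2.length ≤ ps.length
  | [] => Nat.le_refl _
  | p :: ps => by
    simp only [pvTakeRun]
    split
    · exact Nat.le_trans (pvTakeRun_rest_length k ps) (Nat.le_succ _)
    · exact Nat.le_refl _

-- … and repeat on the remainder: the list of groups.
def pvGroups : List (Int × Int) → List (List (Int × Int))
  | [] => []
  | p :: ps =>
    (p :: (pvTakeRun (p.2 - p.1) ps).1) :: pvGroups (pvTakeRun (p.2 - p.1) ps).2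
  termination_by l => l.length
  decreasing_by exact Nat.lt_succ_of_le (pvTakeRun_rest_length _ _)

def tainted_chunks_alt (byte_offsets : List Int) : List (Int × Int) :=
  let vals := PySem.List.sorted (PySem.Set.ofList byte_offsets) (fun x => x) false
  (pvGroups (PySem.List.enumerate vals 0)).map fun run =>
    ((run.headD (0, 0)).2, (run.getLast?.getD (0, 0)).2 + 1)

-- ===== PRECONDITION & SPEC =====
def Spec_tainted_chunks (byte_offsets : List Int) (out : List (Int × Int)) : Prop := out = tainted_chunks_alt byte_offsets
instance (byte_offsets : List Int) (out : List (Int × Int)) : Decidable (Spec_tainted_chunks byte_offsets out) := by unfold Spec_tainted_chunks; infer_instance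

-- ===== CLAIM (what is proved, stated in full; the proofs are below) =====
def Claim_equal_tainted_chunks : Prop := ∀ (byte_offsets : List Int), Dom_tainted_chunks byte_offsets → Spec_tainted_chunks byte_offsets (tainted_chunks byte_offsets)

-- ===== LEMMAS AND PROOFS =====

-- A's loop, written as structural recursion on the remaining (sorted) offsets.
def pvRun (s l : Int) : List Int → List (Int × Int)
  | [] => [(s, l + 1)]
  | x :: xs => if x ≠ l ∧ x ≠ l + 1 then (s, l + 1) :: pvRun x x xs else pvRun s x xs

-- Same thing on a duplicate-free tail (the 'x = l' case cannot occur).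
def pvRunS (s l : Int) : List Int → List (Int × Int)
  | [] => [(s, l + 1)]
  | x :: xs => if x = l + 1 then pvRunS s x xs else (s, l + 1) :: pvRunS x x xs

-- Drop elements equal to the running previous value.
def pvDedup (p : Int) : List Int → List Int
  | [] => []
  | x :: xs => if x = p then pvDedup p xs else x :: pvDedup x xs

def pvFin (st : Option Int × Option Int × List (Int × Int)) : List (Int × Int) :=
  match st with
  | (start?, last?, acc) =>
    match last? with
    | none => acc
    | some l => acc ++ [(start?.getD 0, l + 1)]

theorem pvFoldA_eq_run : ∀ (xs : List Int) (s l : Int) (acc : List (Int × Int)),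
    pvFin (xs.foldl pvStepA (some s, some l, acc)) = acc ++ pvRun s l xs := by
  intro xs
  induction xs with
  | nil => intro s l acc; simp [pvFin, pvRun]
  | cons x xs ih =>
    intro s l acc
    simp only [List.foldl_cons, pvStepA, pvRun]
    split
    · rw [ih]; simp
    · rw [ih]

theorem tainted_chunks_eq (xs : List Int) :
    tainted_chunks xs =
      match PySem.List.sorted xs (fun x => x) false with
      | [] => []
      | h :: t => pvRun h h t := by
  unfold tainted_chunks
  cases hs : PySem.List.sorted xs (fun x => x) false with
  | nil => rfl
  | cons h t =>
    have : (h :: t).foldl pvStepA (none, none, ([] : List (Int × Int)))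
        = t.foldl pvStepA (some h, some h, []) := rfl
    rw [this]
    have := pvFoldA_eq_run t h h []
    simp only [pvFin] at this
    simp at this; exact this

theorem pvRun_dedup : ∀ (xs : List Int) (s l : Int),
    pvRun s l xs = pvRun s l (pvDedup l xs) := by
  intro xs
  induction xs with
  | nil => intro s l; rfl
  | cons x xs ih =>
    intro s l
    by_cases hx : x = l
    · subst hx
      simp only [pvRun, pvDedup]
      have : ¬ (x ≠ x ∧ x ≠ x + 1) := by simp
      rw [if_neg this]
      exact ih s x
    · simp only [pvDedup, if_neg hx, pvRun]
      by_cases h1 : x = l + 1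
      · have : ¬ (x ≠ l ∧ x ≠ l + 1) := by simp [h1]
        rw [if_neg this, if_neg this]
        exact ih s x
      · have : (x ≠ l ∧ x ≠ l + 1) := ⟨hx, h1⟩
        rw [if_pos this, if_pos this, ih x x]

theorem pvRun_eq_runS : ∀ (xs : List Int) (s l : Int),
    List.Pairwise (· < ·) (l :: xs) → pvRun s l xs = pvRunS s l xs := by
  intro xs
  induction xs with
  | nil => intro s l _; rfl
  | cons x xs ih =>
    intro s l hp
    have hlx : l < x := (List.pairwise_cons.mp hp).1 x (by simp)
    have htail : List.Pairwise (· < ·) (x :: xs) := (List.pairwise_cons.mp hp).2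
    have hxl : x ≠ l := by omega
    simp only [pvRun, pvRunS]
    by_cases h1 : x = l + 1
    · have : ¬ (x ≠ l ∧ x ≠ l + 1) := by simp [h1]
      rw [if_neg this, if_pos h1]
      exact ih s x htail
    · rw [if_pos ⟨hxl, h1⟩, if_neg h1, ih x x htail]

theorem mem_pvDedup : ∀ (xs : List Int) (p a : Int), a ∈ pvDedup p xs → a ∈ xs := by
  intro xs
  induction xs with
  | nil => intro p a h; simpa [pvDedup] using h
  | cons x xs ih =>
    intro p a h
    simp only [pvDedup] at h
    split at h
    · exact List.mem_cons_of_mem _ (ih p a h)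
    · rcases List.mem_cons.mp h with h | h
      · simp [h]
      · exact List.mem_cons_of_mem _ (ih x a h)

theorem mem_pvDedup_of_mem : ∀ (xs : List Int) (p a : Int), a ∈ xs → a = p ∨ a ∈ pvDedup p xs := by
  intro xs
  induction xs with
  | nil => intro p a h; simp at h
  | cons x xs ih =>
    intro p a h
    rcases List.mem_cons.mp h with h | h
    · subst h
      by_cases hx : a = p
      · exact Or.inl hx
      · right; simp [pvDedup, if_neg hx]
    · by_cases hx : x = p
      · subst hx
        rcases ih x a h with h' | h'
        · exact Or.inl h'
        · right; simpa [pvDedup] using h'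
      · rcases ih x a h with h' | h'
        · right; simp [pvDedup, if_neg hx, h']
        · right; simp [pvDedup, if_neg hx]; exact Or.inr h'

theorem pairwise_dedup : ∀ (xs : List Int) (h : Int),
    List.Pairwise (· ≤ ·) (h :: xs) → List.Pairwise (· < ·) (h :: pvDedup h xs) := by
  intro xs
  induction xs with
  | nil => intro h _; simp [pvDedup]
  | cons x xs ih =>
    intro h hp
    by_cases hx : x = h
    · subst hx
      simp only [pvDedup]
      apply ih
      exact hp.sublist (List.Sublist.cons₂ x (List.sublist_cons_self x xs))
    · have hhx : h ≤ x := (List.pairwise_cons.mp hp).1 x (by simp)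
      have hlt : h < x := lt_of_le_of_ne hhx (Ne.symm hx)
      have htail : List.Pairwise (· ≤ ·) (x :: xs) := (List.pairwise_cons.mp hp).2
      have ihx := ih x htail
      simp only [pvDedup, if_neg hx]
      refine List.pairwise_cons.mpr ⟨?_, ihx⟩
      intro y hy
      rcases List.mem_cons.mp hy with hy | hy
      · subst hy; exact hlt
      · have : x ≤ y := le_of_lt ((List.pairwise_cons.mp ihx).1 y hy)
        omega

-- The groupby side: peeling pvTakeRun/pvGroups over enumerated strictly increasing values
-- reproduces pvRunS.
theorem pvGroups_char : ∀ (xs : List Int) (s v i : Int),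
    List.Pairwise (· < ·) (v :: xs) →
    (s, ((pvTakeRun (v - i) (PySem.List.enumerate xs (i + 1))).1.getLastD (i, v)).2 + 1)
        :: (pvGroups (pvTakeRun (v - i) (PySem.List.enumerate xs (i + 1))).2).map
            (fun run => ((run.headD (0, 0)).2, (run.getLast?.getD (0, 0)).2 + 1))
      = pvRunS s v xs := by
  intro xs
  induction xs with
  | nil => intro s v i _; simp [PySem.List.enumerate, pvTakeRun, pvGroups, pvRunS]
  | cons x xs ih =>
    intro s v i hp
    have hvx : v < x := (List.pairwise_cons.mp hp).1 x (by simp)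
    have htail : List.Pairwise (· < ·) (x :: xs) := (List.pairwise_cons.mp hp).2
    rw [PySem.List.enumerate_cons]
    simp only [pvRunS]
    by_cases h1 : x = v + 1
    · rw [if_pos h1]
      have hkey : x - (i + 1) = v - i := by omega
      simp only [pvTakeRun, hkey]
      have := ih s x (i + 1) htail
      rw [hkey] at this
      rw [← this]
      congr 1
      congr 1
      cases hr : (pvTakeRun (v - i) (PySem.List.enumerate xs (i + 1 + 1))).1 with
      | nil => simp
      | cons q qs => simp [List.getLast?_cons]
    · rw [if_neg h1]
      have hkey : ¬ (x - (i + 1) = v - i) := by omega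
      simp only [pvTakeRun, if_neg hkey]
      simp only [List.getLastD, pvGroups, List.map_cons]
      have := ih x x (i + 1) htail
      congr 1
      rw [← this]
      congr 1
      simp only [List.headD]
      congr 1
      cases hr : (pvTakeRun (x - (i + 1)) (PySem.List.enumerate xs (i + 1 + 1))).1 with
      | nil => simp
      | cons q qs => simp [List.getLast?_cons]

theorem main_equal (xs : List Int) : tainted_chunks xs = tainted_chunks_alt xs := by
  rw [tainted_chunks_eq]
  cases hs : PySem.List.sorted xs (fun x => x) false with
  | nil =>
    have hx : xs = [] := (PySem.List.sorted_eq_nil_iff _ _ _).mp hs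
    subst hx
    have h0 : PySem.List.enumerate (PySem.List.sorted (PySem.Set.ofList ([] : List Int)) (fun x => x) false) 0 = [] := rfl
    show ([] : List (Int × Int)) =
      (pvGroups (PySem.List.enumerate
        (PySem.List.sorted (PySem.Set.ofList ([] : List Int)) (fun x => x) false) 0)).map
        (fun run => ((run.headD (0, 0)).2, (run.getLast?.getD (0, 0)).2 + 1))
    rw [h0]
    simp [pvGroups]
  | cons h t =>
    -- the strictly increasing distinct values
    have hpl : List.Pairwise (· ≤ ·) (h :: t) := by
      have := PySem.List.sorted_pairwise (xs := xs) (key := fun x => x)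
      rw [hs] at this; exact this
    have hD : List.Pairwise (· < ·) (h :: pvDedup h t) := pairwise_dedup t h hpl
    -- vals = h :: pvDedup h t
    have hvals : PySem.List.sorted (PySem.Set.ofList xs) (fun x => x) false = h :: pvDedup h t := by
      apply PySem.List.sorted_eq_of_perm_of_pairwise_lt
      · rw [List.perm_ext_iff_of_nodup (hD.imp (fun hab => ne_of_lt hab)) (PySem.Set.nodup_ofList xs)]
        intro a
        have hmem : a ∈ h :: pvDedup h t ↔ a ∈ h :: t := by
          constructor
          · intro ha
            rcases List.mem_cons.mp ha with ha | ha
            · simp [ha]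
            · exact List.mem_cons_of_mem _ (mem_pvDedup t h a ha)
          · intro ha
            rcases List.mem_cons.mp ha with ha | ha
            · simp [ha]
            · rcases mem_pvDedup_of_mem t h a ha with ha' | ha'
              · simp [ha']
              · exact List.mem_cons_of_mem _ ha'
        rw [hmem, PySem.Set.mem_ofList, ← hs, PySem.List.mem_sorted]
      · exact hD
    show pvRun h h t = _
    unfold tainted_chunks_alt
    rw [hvals]
    show _ = (pvGroups (PySem.List.enumerate (h :: pvDedup h t) 0)).map _
    rw [pvRun_dedup t h h, pvRun_eq_runS _ _ _ hD]
    rw [PySem.List.enumerate_cons]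
    simp only [pvGroups, List.map_cons]
    have := pvGroups_char (pvDedup h t) h h 0 hD
    rw [← this]
    congr 1
    simp only [List.headD]
    congr 1
    cases hr : (pvTakeRun (h - 0) (PySem.List.enumerate (pvDedup h t) (0 + 1))).1 with
    | nil => simp
    | cons q qs => simp [List.getLast?_cons]

-- ===== VERDICT (by name: the statement is the Claim_ definition above) =====
theorem tainted_chunks_spec : Claim_equal_tainted_chunks := by
  intro xs _
  unfold Spec_tainted_chunks
  exact main_equal xs
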